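-- pv_equiv track=rewrite | github.com/michael-diggin/fsgm | bench/python_dfs.py | gen_counts_with_words
-- ===== SOURCE A (Python) =====
-- def count(s, w):
--     count = 0
--     index = 0
--     while True:
--         index = s.find(w, index) + 1
--         if index > 0:
--             count+=1
--         else:
--             return count
--
-- def has_substring(s, w):
--     return s.find(w, 0) > -1
--
-- cache = {}
--
-- def add_to_cache(ind, w, c):
--     if cache.get(w, None):
--       cache[w][ind] = c
--       return
--     cache[w] = {ind:c}
--     return
--
-- def gen_counts_with_words(s, w, m, chars, ind):
--     # output is list of tuples
--     # elem 1 is the word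
--     # elem 2 is the data/count
--     output = []
--     if len(w) == m:
--       c = count(s, w)
--       if c > 0:
--         add_to_cache(ind, w, c)
--         return [(w, c)]
--       return []
--
--     for c in chars:
--       if has_substring(s, w+c):
--         ret = gen_counts_with_words(s, w+c, m, chars, ind)
--         output += ret
--
--     return output
-- ===== SOURCE B (Python) =====
-- def gen_counts_with_words(s, w, m, chars, ind):
--     # B: one sliding-window pass counts every length-m substring into a dict and
--     # an iterative frontier expansion replaces A's recursion and its per-word
--     # find-loop counting (A also mutates a module-level cache; B does not --
--     # return-value equivalence only).
--     n = len(s)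
--     win = {}
--     if m >= 0:
--         for i in range(n - m + 1):
--             t = s[i:i + m]
--             win[t] = win.get(t, 0) + 1
--     words = [w]
--     while any(len(x) != m for x in words):
--         words = [y for x in words
--                    for y in ([x] if len(x) == m
--                              else [x + ch for ch in chars if x + ch in s])]
--     return [(x, win[x]) for x in words if win.get(x, 0) > 0]
-- ===== Notes on version B (the rewrite author's own statement) =====
-- stated objective: alternative
-- what changed: replaces A's recursive DFS with a per-leaf find-loop counter by an iterative level-synchronous frontier expansion whose leaf counts come from a dict of length-m sliding-window counts built in one pass; Pre_ excludes exactly the inputs (empty string in chars, len(w) != m, w a substring of s) on which A recurses forever and raises RecursionError (B's loop diverges there too)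
import Mathlib
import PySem

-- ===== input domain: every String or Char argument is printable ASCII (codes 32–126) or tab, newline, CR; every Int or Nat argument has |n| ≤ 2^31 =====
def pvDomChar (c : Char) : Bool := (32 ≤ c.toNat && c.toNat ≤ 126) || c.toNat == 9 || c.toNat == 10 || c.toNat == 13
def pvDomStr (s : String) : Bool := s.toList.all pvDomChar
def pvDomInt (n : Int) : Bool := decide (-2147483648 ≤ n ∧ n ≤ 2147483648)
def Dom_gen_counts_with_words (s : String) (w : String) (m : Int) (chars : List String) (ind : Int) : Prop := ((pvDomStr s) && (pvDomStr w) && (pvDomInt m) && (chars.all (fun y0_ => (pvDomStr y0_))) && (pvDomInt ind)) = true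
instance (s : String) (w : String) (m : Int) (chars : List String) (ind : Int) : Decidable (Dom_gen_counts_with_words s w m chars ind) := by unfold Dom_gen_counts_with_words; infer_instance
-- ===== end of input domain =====

-- B replaces A's recursive DFS (per-leaf find-loop counting) by an iterative frontier
-- expansion with a one-pass dict of sliding-window counts; A also mutates a module-level
-- cache, B does not — the equivalence proved here is about the RETURN value only.

-- ===== PORT A =====
-- count(s, w): while True: index = s.find(w, index) + 1 … — fuel only makes the loop
-- total; s.length + 2 iterations always suffice (the start index strictly increases).
def pyCountGo (s w : List Char) : Nat → Int → Int → Int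
  | 0, cnt, _ => cnt
  | f + 1, cnt, index =>
    if PySem.Chars.findFrom s w index none + 1 > 0 then
      pyCountGo s w f (cnt + 1) (PySem.Chars.findFrom s w index none + 1)
    else cnt

def pyCount (s w : List Char) : Int := pyCountGo s w (s.length + 2) 0 0

-- has_substring(s, w) = s.find(w, 0) > -1
def hasSubA (s w : List Char) : Bool := decide (PySem.Chars.findFrom s w 0 none > -1)

-- the recursion of gen_counts_with_words; fuel only makes it total (each recursive call
-- extends w, which under Pre_ strictly lengthens it while it stays a substring of s)
def genGo (s : List Char) (m : Int) (cs : List (List Char)) : Nat → List Char → List (List Char × Int)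
  | f, w =>
    if (w.length : Int) = m then
      (if pyCount s w > 0 then [(w, pyCount s w)] else [])
    else
      match f with
      | 0 => []
      | f' + 1 =>
        cs.foldl (fun output c =>
          if hasSubA s (w ++ c) then output ++ genGo s m cs f' (w ++ c) else output) []

def gen_counts_with_words (s : String) (w : String) (m : Int) (chars : List String) (ind : Int) : List (String × Int) :=
  (genGo s.toList m (chars.map String.toList) (s.toList.length + 2) w.toList).map
    (fun p => (String.ofList p.1, p.2))

-- ===== PORT B =====
-- win: one sliding pass, win[t] = win.get(t, 0) + 1 over all length-m windows
def winDict (s : List Char) (m : Int) : PySem.Dict (List Char) Int :=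
  if 0 ≤ m then
    (PySem.List.pyRange 0 ((s.length : Int) - m + 1) 1).foldl
      (fun d i => d.insert (PySem.List.slice s (some i) (some (i + m)))
        (d.getD (PySem.List.slice s (some i) (some (i + m))) 0 + 1)) PySem.Dict.empty
  else PySem.Dict.empty

-- one frontier step: keep finished words, expand the rest by every c with x+c in s
def expandStep (s : List Char) (m : Int) (cs : List (List Char)) (ws : List (List Char)) : List (List Char) :=
  ws.flatMap (fun x =>
    if (x.length : Int) = m then [x]
    else (cs.filter (fun c => PySem.Chars.isIn (x ++ c) s)).map (fun c => x ++ c))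

-- while any(len(x) != m for x in words): words = …  (fuel only makes the loop total;
-- s.length + 2 iterations always suffice under Pre_)
def altLoop (s : List Char) (m : Int) (cs : List (List Char)) : Nat → List (List Char) → List (List Char)
  | 0, ws => ws
  | f + 1, ws =>
    if ws.any (fun x => decide ((x.length : Int) ≠ m)) then
      altLoop s m cs f (expandStep s m cs ws)
    else ws

def gen_counts_with_words_alt (s : String) (w : String) (m : Int) (chars : List String) (ind : Int) : List (String × Int) :=
  let sl := s.toList
  let win := winDict sl m
  let ws := altLoop sl m (chars.map String.toList) (sl.length + 2) [w.toList]
  (ws.filter (fun x => decide (win.getD x 0 > 0))).map (fun x => (String.ofList x, win.getD x 0))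

-- ===== PRECONDITION & SPEC =====
-- Pre_ excludes exactly the inputs on which A recurses forever — chars containing the
-- empty string while w has length ≠ m and is a substring of s — where A raises
-- RecursionError (B's loop does not terminate there either).
def Pre_gen_counts_with_words (s : String) (w : String) (m : Int) (chars : List String) (ind : Int) : Prop :=
  "" ∈ chars → ((w.toList.length : Int) = m ∨ PySem.Str.isIn w s = false)
instance (s : String) (w : String) (m : Int) (chars : List String) (ind : Int) : Decidable (Pre_gen_counts_with_words s w m chars ind) := by unfold Pre_gen_counts_with_words; infer_instance

def pvWitness_gen_counts_with_words : String × String × Int × List String × Int :=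
  ("abcab", "", 2, ["a", "b", "c"], 0)

def Spec_gen_counts_with_words (s : String) (w : String) (m : Int) (chars : List String) (ind : Int) (out : List (String × Int)) : Prop := out = gen_counts_with_words_alt s w m chars ind
instance (s : String) (w : String) (m : Int) (chars : List String) (ind : Int) (out : List (String × Int)) : Decidable (Spec_gen_counts_with_words s w m chars ind out) := by unfold Spec_gen_counts_with_words; infer_instance

-- ===== CLAIM (what is proved, stated in full; the proofs are below) =====
def Claim_equal_gen_counts_with_words : Prop := ∀ (s : String) (w : String) (m : Int) (chars : List String) (ind : Int), Dom_gen_counts_with_words s w m chars ind → Pre_gen_counts_with_words s w m chars ind → Spec_gen_counts_with_words s w m chars ind (gen_counts_with_words s w m chars ind)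

-- ===== LEMMAS AND PROOFS =====

-- number of occurrences of w in s starting at position ≥ k (overlapping)
def occNat (s w : List Char) (k : Nat) : Nat :=
  (List.range (s.length + 1)).countP (fun j => decide (k ≤ j) && decide (w <+: s.drop j))

theorem countP_range_extend (p : Nat → Bool) (a b : Nat) (hab : a ≤ b)
    (h : ∀ j, a ≤ j → j < b → p j = false) :
    (List.range b).countP p = (List.range a).countP p := by
  have hb : b = a + (b - a) := by omega
  have hz : List.countP p ((List.range (b - a)).map (fun x => a + x)) = 0 := by
    rw [List.countP_map, List.countP_eq_zero]
    intro j hj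
    have hj' := List.mem_range.mp hj
    simp [h (a + j) (by omega) (by omega)]
  conv_lhs => rw [hb, List.range_add]
  rw [List.countP_append, hz, add_zero]

theorem countP_beq_or (l : List Nat) (p0 : Nat) (q : Nat → Bool) (hq : q p0 = false) :
    l.countP (fun j => (j == p0) || q j) = l.countP q + l.count p0 := by
  induction l with
  | nil => simp
  | cons a l ih =>
    by_cases ha : a = p0
    · subst ha
      simp [List.countP_cons, List.count_cons, hq, ih]
      omega
    · simp [List.countP_cons, List.count_cons, ha, ih]
      omega

-- A's leaf emission
def emitA (s : List Char) (x : List Char) : List (List Char × Int) :=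
  if pyCount s x > 0 then [(x, pyCount s x)] else []

theorem findFrom_past (s w : List Char) (k : Nat) (h : s.length < k) :
    PySem.Chars.findFrom s w (k : Int) none = -1 := by
  simp only [PySem.Chars.findFrom]
  rw [if_neg (by omega : ¬ ((k : Int) < 0)), if_pos (by exact_mod_cast h)]

theorem prefix_drop_infix_drop (w s : List Char) (j k : Nat) (hk : k ≤ j)
    (h : w <+: s.drop j) : w <:+: s.drop k := by
  have h2 : s.drop j = (s.drop k).drop (j - k) := by rw [List.drop_drop]; congr 1; omega
  rw [h2] at h
  exact h.isInfix.trans (List.drop_suffix _ _).isInfix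

theorem pyCountGo_eq (s w : List Char) :
    ∀ fuel (k : Nat) (cnt : Int), k ≤ s.length + 1 → s.length + 2 - k ≤ fuel →
      pyCountGo s w fuel cnt (k : Int) = cnt + (occNat s w k : Int) := by
  intro fuel
  induction fuel with
  | zero => intro k cnt hk hf; omega
  | succ f ih =>
    intro k cnt hk hf
    by_cases hkn : k ≤ s.length
    · simp only [pyCountGo]
      rw [PySem.Chars.findFrom_natCast s w k hkn]
      by_cases hfind : PySem.Chars.find (s.drop k) w = -1
      · rw [if_pos hfind]
        have hnoinfix := (PySem.Chars.find_eq_neg_one_iff _ _).mp hfind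
        have hocc : occNat s w k = 0 := by
          simp only [occNat, List.countP_eq_zero]
          intro j hj
          simp only [Bool.and_eq_true, decide_eq_true_iff, not_and]
          intro hkj hprej
          exact hnoinfix (prefix_drop_infix_drop w s j k hkj hprej)
        rw [if_neg (by norm_num), hocc]
        simp
      · rw [if_neg hfind]
        have hd0 : 0 ≤ PySem.Chars.find (s.drop k) w := by
          have := PySem.Chars.neg_one_le_find (s.drop k) w
          omega
        obtain ⟨hpre, hmin⟩ := PySem.Chars.find_spec hd0
        rw [List.drop_drop] at hpre
        set d := PySem.Chars.find (s.drop k) w with hd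
        set p := k + d.toNat with hp
        have hplen : p ≤ s.length := by
          by_cases hw : w = []
          · have : d = 0 := by rw [hd, hw, PySem.Chars.find_nil]
            omega
          · have hlen := hpre.length_le
            have hwpos : 0 < w.length := List.length_pos_iff.mpr hw
            rw [List.length_drop] at hlen
            omega
        have harith : ((k : Int) + d + 1) = (((p + 1 : Nat)) : Int) := by
          rw [hp]
          push_cast [Int.toNat_of_nonneg hd0]
          ring
        rw [if_pos (by omega), harith, ih (p + 1) (cnt + 1) (by omega) (by omega)]
        have hocc : occNat s w k = occNat s w (p + 1) + 1 := by
          have key : ∀ j, (decide (k ≤ j) && decide (w <+: s.drop j)) =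
              ((j == p) || (decide (p + 1 ≤ j) && decide (w <+: s.drop j))) := by
            intro j
            rw [Bool.eq_iff_iff]
            simp only [Bool.and_eq_true, Bool.or_eq_true, decide_eq_true_iff, beq_iff_eq]
            constructor
            · rintro ⟨hkj, hprej⟩
              rcases lt_trichotomy j p with h | h | h
              · exfalso
                have hm := hmin (j - k) (by omega)
                rw [List.drop_drop] at hm
                have hjj : k + (j - k) = j := by omega
                rw [hjj] at hm
                exact hm hprej
              · exact Or.inl h
              · exact Or.inr ⟨by omega, hprej⟩
            · rintro (rfl | ⟨hj, hprej⟩)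
              · exact ⟨by omega, hpre⟩
              · exact ⟨by omega, hprej⟩
          rw [occNat, List.countP_congr (fun x _ => by rw [key x]),
              countP_beq_or _ p _ (by simp), occNat]
          have hcount : (List.range (s.length + 1)).count p = 1 := by
            have hplt : p < s.length + 1 := by omega
            simp [List.count_range, hplt]
          omega
        rw [hocc]
        push_cast
        ring
    · simp only [pyCountGo]
      rw [findFrom_past s w k (by omega)]
      have hocc : occNat s w k = 0 := by
        simp only [occNat, List.countP_eq_zero]
        intro j hj
        have := List.mem_range.mp hj
        simp only [Bool.and_eq_true, decide_eq_true_iff, not_and]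
        intro hkj
        omega
      rw [if_neg (by norm_num), hocc]
      simp

theorem pyCount_eq (s w : List Char) : pyCount s w = (occNat s w 0 : Int) := by
  have h := pyCountGo_eq s w (s.length + 2) 0 0 (by omega) (by omega)
  simpa [pyCount] using h

theorem winDict_getD (s w : List Char) (m : Int) (hm : (w.length : Int) = m) :
    (winDict s m).getD w 0 = (occNat s w 0 : Int) := by
  subst hm
  simp only [winDict, if_pos (show (0 : Int) ≤ (w.length : Int) by positivity)]
  rw [← List.foldl_map
        (f := fun i : Int => PySem.List.slice s (some i) (some (i + (w.length : Int))))
        (g := fun d t => PySem.Dict.insert d t (PySem.Dict.getD d t 0 + 1)),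
      PySem.Dict.getD_foldl_insert_add_one, PySem.Dict.getD_empty, zero_add]
  rw [Nat.cast_inj]
  rw [List.count_eq_countP, List.countP_map, PySem.List.pyRange_one, List.countP_map]
  have hN : (((s.length : Int) - (w.length : Int) + 1) - 0).toNat = s.length + 1 - w.length := by
    omega
  rw [hN]
  have hmid : (List.range (s.length + 1 - w.length)).countP
      (((fun x => x == w) ∘ (fun i : Int => PySem.List.slice s (some i) (some (i + (w.length : Int))))) ∘
        (fun k : Nat => (0 : Int) + (k : Int))) =
      (List.range (s.length + 1 - w.length)).countP (fun j => decide (w <+: s.drop j)) := by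
    refine List.countP_congr (fun j hj => ?_)
    have hjlt := List.mem_range.mp hj
    simp only [Function.comp_apply, zero_add, PySem.List.slice_natCast_add, beq_iff_eq,
      decide_eq_true_iff]
    rw [List.prefix_iff_eq_take, eq_comm]
  rw [hmid]
  have hfalse : ∀ j, s.length + 1 - w.length ≤ j → j < s.length + 1 →
      (fun j => decide (w <+: s.drop j)) j = false := by
    intro j h1 h2
    simp only [decide_eq_false_iff_not]
    intro hprej
    have hlen := hprej.length_le
    rw [List.length_drop] at hlen
    omega
  rw [← countP_range_extend (fun j => decide (w <+: s.drop j)) (s.length + 1 - w.length)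
        (s.length + 1) (by omega) hfalse]
  simp [occNat]

theorem hasSubA_eq_isIn (s t : List Char) : hasSubA s t = PySem.Chars.isIn t s := by
  simp only [hasSubA, PySem.Chars.findFrom_zero]
  rw [Bool.eq_iff_iff, decide_eq_true_iff, PySem.Chars.isIn_iff_infix, ← PySem.Chars.find_nonneg_iff]
  omega

theorem genGo_final (s : List Char) (m : Int) (cs : List (List Char)) (f : Nat)
    (x : List Char) (hx : (x.length : Int) = m) : genGo s m cs f x = emitA s x := by
  cases f <;> simp only [genGo, emitA, if_pos hx]

theorem genGo_step (s : List Char) (m : Int) (cs : List (List Char)) (f : Nat)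
    (x : List Char) (hx : ¬ (x.length : Int) = m) :
    genGo s m cs (f + 1) x =
      ((cs.filter (fun c => PySem.Chars.isIn (x ++ c) s)).map (fun c => x ++ c)).flatMap
        (genGo s m cs f) := by
  rw [List.flatMap_map]
  simp only [genGo, if_neg hx]
  rw [PySem.List.foldl_if_eq_foldl_filter (p := fun c => hasSubA s (x ++ c))
        (f := fun output c => output ++ genGo s m cs f (x ++ c)),
      PySem.List.foldl_append_eq_flatMap, List.nil_append]
  congr 1
  exact List.filter_congr (fun c _ => hasSubA_eq_isIn s (x ++ c))

theorem loop_flat (s : List Char) (m : Int) (cs : List (List Char))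
    (hpre : ∀ c ∈ cs, c ≠ []) :
    ∀ (f : Nat) (ws : List (List Char)),
      (∀ x ∈ ws, (x.length : Int) = m ∨ s.length + 1 - x.length < f) →
      (altLoop s m cs f ws).flatMap (emitA s) = ws.flatMap (genGo s m cs f) ∧
        (∀ x ∈ altLoop s m cs f ws, (x.length : Int) = m) := by
  intro f
  induction f with
  | zero =>
    intro ws hC
    have hfin : ∀ x ∈ ws, (x.length : Int) = m := by
      intro x hx
      rcases hC x hx with h | h
      · exact h
      · omega
    exact ⟨List.flatMap_congr
        (fun x hx => (genGo_final s m cs 0 x (hfin x hx)).symm), by simpa [altLoop] using hfin⟩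
  | succ f ih =>
    intro ws hC
    simp only [altLoop]
    by_cases hany : ws.any (fun x => decide ((x.length : Int) ≠ m)) = true
    · rw [if_pos hany]
      have hC' : ∀ y ∈ expandStep s m cs ws,
          (y.length : Int) = m ∨ s.length + 1 - y.length < f := by
        intro y hy
        simp only [expandStep, List.mem_flatMap] at hy
        obtain ⟨x, hxmem, hyx⟩ := hy
        by_cases hxf : (x.length : Int) = m
        · rw [if_pos hxf] at hyx
          simp only [List.mem_singleton] at hyx
          subst hyx
          exact Or.inl hxf
        · rw [if_neg hxf] at hyx
          simp only [List.mem_map, List.mem_filter] at hyx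
          obtain ⟨c, ⟨hc, hcin⟩, rfl⟩ := hyx
          right
          have hclen : 0 < c.length := List.length_pos_iff.mpr (hpre c hc)
          have hyinf : (x ++ c) <:+: s := (PySem.Chars.isIn_iff_infix _ _).mp hcin
          have hylen : (x ++ c).length ≤ s.length := hyinf.length_le
          rcases hC x hxmem with h | h
          · exact absurd h hxf
          · simp only [List.length_append] at hylen ⊢
            omega
      obtain ⟨h1, h2⟩ := ih (expandStep s m cs ws) hC'
      refine ⟨?_, h2⟩
      rw [h1]
      simp only [expandStep, List.flatMap_assoc]
      refine List.flatMap_congr (fun x hx => ?_)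
      by_cases hxf : (x.length : Int) = m
      · rw [if_pos hxf]
        simp only [List.flatMap_cons, List.flatMap_nil, List.append_nil]
        rw [genGo_final s m cs f x hxf, genGo_final s m cs (f + 1) x hxf]
      · rw [if_neg hxf, ← genGo_step s m cs f x hxf]
    · rw [if_neg hany]
      have hfin : ∀ x ∈ ws, (x.length : Int) = m := by
        intro x hx
        by_contra hne
        exact hany (List.any_eq_true.mpr ⟨x, hx, by simpa using hne⟩)
      exact ⟨List.flatMap_congr
        (fun x hx => (genGo_final s m cs (f + 1) x (hfin x hx)).symm), hfin⟩

theorem altLoop_succ (s : List Char) (m : Int) (cs : List (List Char)) (f : Nat)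
    (ws : List (List Char)) :
    altLoop s m cs (f + 1) ws =
      if ws.any (fun x => decide ((x.length : Int) ≠ m)) then
        altLoop s m cs f (expandStep s m cs ws)
      else ws := rfl

theorem altLoop_nil (s : List Char) (m : Int) (cs : List (List Char)) (f : Nat) :
    altLoop s m cs f [] = [] := by
  cases f <;> simp [altLoop]

theorem genGo_no_sub (s : List Char) (m : Int) (cs : List (List Char)) (f : Nat)
    (w : List Char) (hnf : ¬ (w.length : Int) = m) (hw : ¬ w <:+: s) :
    genGo s m cs f w = [] := by
  cases f with
  | zero => simp [genGo, hnf]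
  | succ f =>
    rw [genGo_step s m cs f w hnf, List.filter_eq_nil_iff.mpr ?_]
    · simp
    · intro c _
      rw [Bool.not_eq_true, PySem.Chars.isIn_eq_false_iff]
      intro h
      exact hw ((List.prefix_append w c).isInfix.trans h)

theorem expandStep_no_sub (s : List Char) (m : Int) (cs : List (List Char))
    (w : List Char) (hnf : ¬ (w.length : Int) = m) (hw : ¬ w <:+: s) :
    expandStep s m cs [w] = [] := by
  simp only [expandStep, List.flatMap_cons, List.flatMap_nil, List.append_nil, if_neg hnf]
  rw [List.filter_eq_nil_iff.mpr ?_]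
  · simp
  · intro c _
    rw [Bool.not_eq_true, PySem.Chars.isIn_eq_false_iff]
    intro h
    exact hw ((List.prefix_append w c).isInfix.trans h)

theorem post_eq (s : List Char) (m : Int) (ws : List (List Char))
    (hfin : ∀ x ∈ ws, (x.length : Int) = m) :
    (ws.filter (fun x => decide ((winDict s m).getD x 0 > 0))).map
        (fun x => (String.ofList x, (winDict s m).getD x 0)) =
      (ws.flatMap (emitA s)).map (fun p => (String.ofList p.1, p.2)) := by
  induction ws with
  | nil => simp
  | cons x ws ih =>
    have hx := hfin x (List.mem_cons_self)
    have hg : (winDict s m).getD x 0 = pyCount s x := by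
      rw [winDict_getD s x m hx, pyCount_eq]
    have hrest := ih (fun y hy => hfin y (List.mem_cons_of_mem _ hy))
    by_cases h : pyCount s x > 0
    · simp [emitA, hg, h, hrest]
    · simp [emitA, hg, h, hrest]

-- ===== VERDICT (by name: the statement is the Claim_ definition above) =====
theorem gen_counts_with_words_spec : Claim_equal_gen_counts_with_words := by
  intro s w m chars ind _hdom hpre
  unfold Spec_gen_counts_with_words
  simp only [gen_counts_with_words, gen_counts_with_words_alt]
  by_cases hempty : "" ∈ chars
  · by_cases hfin : (w.toList.length : Int) = m
    · rw [genGo_final s.toList m (chars.map String.toList) (s.toList.length + 2) w.toList hfin,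
          altLoop_succ s.toList m (chars.map String.toList) (s.toList.length + 1) [w.toList],
          if_neg (by simp [show ((w.length : Int) = m) from by simpa using hfin]),
          post_eq s.toList m [w.toList]
            (by intro x hx; simp only [List.mem_singleton] at hx; subst hx; exact hfin)]
      simp
    · have hnsub : PySem.Str.isIn w s = false := (hpre hempty).resolve_left hfin
      have hnsub' : ¬ w.toList <:+: s.toList := by
        rw [← Bool.not_eq_true, PySem.Str.isIn_iff_infix] at hnsub
        exact hnsub
      rw [genGo_no_sub s.toList m (chars.map String.toList) (s.toList.length + 2) w.toList
            hfin hnsub',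
          altLoop_succ s.toList m (chars.map String.toList) (s.toList.length + 1) [w.toList],
          if_pos (by simp [show ¬ ((w.length : Int) = m) from by simpa using hfin]),
          expandStep_no_sub s.toList m (chars.map String.toList) w.toList hfin hnsub',
          altLoop_nil]
      simp
  · have hpre' : ∀ c ∈ chars.map String.toList, c ≠ [] := by
      intro c hc
      obtain ⟨c', hc', rfl⟩ := List.mem_map.mp hc
      intro hnil
      have : c' = "" := by simpa using congrArg String.ofList hnil
      exact hempty (this ▸ hc')
    obtain ⟨h1, h2⟩ := loop_flat s.toList m (chars.map String.toList) hpre'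
        (s.toList.length + 2) [w.toList]
        (by
          intro x hx
          simp only [List.mem_singleton] at hx
          subst hx
          right
          omega)
    rw [post_eq s.toList m _ h2, h1]
    simp
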